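-- pv_equiv track=rewrite | github.com/TaiPee/Robotics2 | guidance/find_path/search.py | orderRootNodes
-- ===== SOURCE A (Python) =====
-- def orderRootNodes(ends, starting_points):
--     """returns an ordered list that will be used as root nodes"""
--     important_points = []
--
--     for i in range(len(ends)):
--             if ends[i] in starting_points:
--                 important_points.append(i)
--
--     for i in range(len(ends)):
--         if i not in important_points:
--             important_points.append(i)
--
--     return important_points
-- ===== SOURCE B (Python) =====
-- def orderRootNodes(ends, starting_points):
--     """returns an ordered list that will be used as root nodes"""
--     important, rest = [], []
--     for i, e in enumerate(ends):
--         if e in starting_points: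
--             important.append(i)
--         else:
--             rest.append(i)
--     return important + rest
-- ===== Notes on version B (the rewrite author's own statement) =====
-- stated objective: simpler
-- what changed: Replaces A's two full index scans (the second re-scanning and membership-testing against the growing result list) with a single partition pass over enumerate(ends) into two lists, returned concatenated.
import Mathlib
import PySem

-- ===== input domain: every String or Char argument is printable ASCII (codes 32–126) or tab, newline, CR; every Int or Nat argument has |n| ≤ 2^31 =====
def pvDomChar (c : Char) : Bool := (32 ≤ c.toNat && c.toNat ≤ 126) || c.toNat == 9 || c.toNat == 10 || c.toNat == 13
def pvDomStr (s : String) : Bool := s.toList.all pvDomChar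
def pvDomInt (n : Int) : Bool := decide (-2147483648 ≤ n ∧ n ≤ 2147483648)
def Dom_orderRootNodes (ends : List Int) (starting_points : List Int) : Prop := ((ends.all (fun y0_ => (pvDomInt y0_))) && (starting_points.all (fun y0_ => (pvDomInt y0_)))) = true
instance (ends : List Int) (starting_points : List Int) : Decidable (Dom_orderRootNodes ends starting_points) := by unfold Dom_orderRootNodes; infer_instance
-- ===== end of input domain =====

-- B replaces A's two full index scans (the second re-scanning membership against the growing result) with one partition pass into two lists, returned concatenated; same output order.


-- ===== PORT A =====
-- Port of A: two passes over range(len(ends)); ends[i] is always in range, pyGetD is exact here.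
def orderRootNodes (ends : List Int) (starting_points : List Int) : List Int :=
  let imp := (PySem.List.pyRange 0 (ends.length : Int) 1).foldl
    (fun acc i => if PySem.List.pyGetD ends i 0 ∈ starting_points then acc ++ [i] else acc) []
  (PySem.List.pyRange 0 (ends.length : Int) 1).foldl
    (fun acc i => if i ∈ acc then acc else acc ++ [i]) imp

-- ===== PORT B =====
-- Port of B: one partition pass over enumerate(ends), then concatenation.
def orderRootNodes_alt (ends : List Int) (starting_points : List Int) : List Int :=
  let st := (PySem.List.enumerate ends 0).foldl
    (fun (st : List Int × List Int) ie =>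
      if ie.2 ∈ starting_points then (st.1 ++ [ie.1], st.2) else (st.1, st.2 ++ [ie.1]))
    ([], [])
  st.1 ++ st.2

-- ===== PRECONDITION & SPEC =====
def Spec_orderRootNodes (ends : List Int) (starting_points : List Int) (out : List Int) : Prop := out = orderRootNodes_alt ends starting_points
instance (ends : List Int) (starting_points : List Int) (out : List Int) : Decidable (Spec_orderRootNodes ends starting_points out) := by unfold Spec_orderRootNodes; infer_instance

-- ===== CLAIM (what is proved, stated in full; the proofs are below) =====
def Claim_equal_orderRootNodes : Prop := ∀ (ends : List Int) (starting_points : List Int), Dom_orderRootNodes ends starting_points → Spec_orderRootNodes ends starting_points (orderRootNodes ends starting_points)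

-- ===== LEMMAS AND PROOFS =====

-- ===== VERDICT (by name: the statement is the Claim_ definition above) =====
-- the membership test both programs make at index i
def pvP (ends : List Int) (starting_points : List Int) (i : Int) : Bool :=
  decide (PySem.List.pyGetD ends i 0 ∈ starting_points)

lemma pvP_eq (ends starting_points : List Int) (i : Int) :
    pvP ends starting_points i = decide (PySem.List.pyGetD ends i 0 ∈ starting_points) := rfl

-- the index list both loops traverse, as Int casts of List.range
def castRange (m : Nat) : List Int := (List.range m).map (fun i : Nat => (i : Int))

lemma castRange_succ (m : Nat) : castRange (m + 1) = castRange m ++ [(m : Int)] := by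
  unfold castRange
  rw [List.range_succ, List.map_append]
  rfl

lemma mem_castRange_lt (m : Nat) (x : Int) (hx : x ∈ castRange m) : x < (m : Int) := by
  unfold castRange at hx
  rcases List.mem_map.1 hx with ⟨i, hi, rfl⟩
  have := List.mem_range.1 hi
  omega

lemma pyRange_len (n : Nat) : PySem.List.pyRange 0 (n : Int) 1 = castRange n := by
  rw [PySem.List.pyRange_one]
  unfold castRange
  have h1 : ((n : Int) - 0).toNat = n := by omega
  rw [h1]
  apply List.map_congr_left
  intro k _
  omega

-- B's partition fold, characterised as two filters
lemma bfold (ends starting_points : List Int) :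
    ∀ (l : List Int) (a b : List Int),
      l.foldl (fun (st : List Int × List Int) i =>
          if PySem.List.pyGetD ends i 0 ∈ starting_points then (st.1 ++ [i], st.2) else (st.1, st.2 ++ [i]))
        (a, b)
      = (a ++ l.filter (pvP ends starting_points),
         b ++ l.filter (fun i => ! pvP ends starting_points i)) := by
  intro l
  induction l with
  | nil => intro a b; simp
  | cons x xs ih =>
    intro a b
    by_cases h : PySem.List.pyGetD ends x 0 ∈ starting_points
    · have hp : pvP ends starting_points x = true := by simp [pvP_eq, h]
      simp [List.foldl_cons, h, ih, hp]
    · have hp : pvP ends starting_points x = false := by simp [pvP_eq, h]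
      simp [List.foldl_cons, h, ih, hp]

-- A's second loop: appends exactly the indices not already present in init
lemma loop2 (ends starting_points : List Int) :
    ∀ (m : Nat) (init : List Int),
      (∀ i : Nat, i < m → (((i : Int) ∈ init) ↔ pvP ends starting_points (i : Int) = true)) →
      (castRange m).foldl (fun acc i => if i ∈ acc then acc else acc ++ [i]) init
      = init ++ (castRange m).filter (fun i => ! pvP ends starting_points i) := by
  intro m
  induction m with
  | zero => intro init _; simp [castRange]
  | succ m ih =>
    intro init h
    rw [castRange_succ, List.foldl_append, ih init (fun i hi => h i (by omega)),
        List.filter_append]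
    have hnot : (m : Int) ∉ (castRange m).filter (fun i => ! pvP ends starting_points i) := by
      intro hmem
      have := mem_castRange_lt m _ (List.mem_filter.1 hmem).1
      omega
    simp only [List.foldl_cons, List.foldl_nil, List.filter_cons, List.filter_nil,
      List.mem_append]
    by_cases hp : pvP ends starting_points (m : Int) = true
    · have hin : (m : Int) ∈ init := (h m (by omega)).2 hp
      simp [hin, hp]
    · have h1 : (m : Int) ∉ init := fun hmem => hp ((h m (by omega)).1 hmem)
      have hcond : ¬ ((m : Int) ∈ init ∨ (m : Int) ∈ (castRange m).filter (fun i => ! pvP ends starting_points i)) := by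
        rintro (h' | h')
        · exact h1 h'
        · exact hnot h'
      rw [if_neg hcond]
      simp [hp, List.append_assoc]

lemma mem_impList (ends starting_points : List Int) (i : Nat) (hi : i < ends.length) :
    ((i : Int) ∈ (castRange ends.length).filter (pvP ends starting_points))
      ↔ pvP ends starting_points (i : Int) = true := by
  constructor
  · intro hmem
    exact (List.mem_filter.1 hmem).2
  · intro hp
    refine List.mem_filter.2 ⟨?_, hp⟩
    unfold castRange
    exact List.mem_map.2 ⟨i, List.mem_range.2 hi, rfl⟩

-- ===== VERDICT (by name: the statement is the Claim_ definition above) =====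
theorem orderRootNodes_spec : Claim_equal_orderRootNodes := by
  intro ends starting_points _
  unfold Spec_orderRootNodes orderRootNodes orderRootNodes_alt
  simp only [PySem.List.enumerate_eq_map_pyRange (d := (0:Int)), List.foldl_map,
    PySem.List.len_eq, pyRange_len]
  rw [bfold ends starting_points]
  rw [PySem.List.foldl_append_ite (p := fun i => PySem.List.pyGetD ends i 0 ∈ starting_points)
        (f := fun i => i)]
  simp only [List.nil_append, List.map_id']
  rw [loop2 ends starting_points ends.length]
  · rfl
  · intro i hi
    exact mem_impList ends starting_points i hi
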